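-- pv_equiv track=rewrite | github.com/KolbotForever/darcs-visual-pickit | nip_parser.py | find_invalid_comparison_operators
-- ===== SOURCE A (Python) =====
-- def find_invalid_comparison_operators(text: str):
--     text = text or ""
--     bad = []
--     bracket_depth = 0
--     i = 0
--     while i < len(text):
--         ch = text[i]
--         if ch == "[":
--             bracket_depth += 1
--             i += 1
--             continue
--         if ch == "]":
--             bracket_depth = max(0, bracket_depth - 1)
--             i += 1
--             continue
--         if bracket_depth == 0 and ch in "<>!=":
--             j = i
--             while j < len(text) and text[j] in "<>!=":
--                 j += 1
--             op_run = text[i:j]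
--             if op_run not in ("==", "!=", ">=", "<=", ">", "<"):
--                 bad.append((op_run, i + 1))
--             i = j
--             continue
--         i += 1
--     return bad
-- ===== SOURCE B (Python) =====
-- def find_invalid_comparison_operators(text: str):
--     text = text or ""
--     VALID = ("==", "!=", ">=", "<=", ">", "<")
--     bad = []
--     depth = 0
--     run = ""
--     start = 0
--     for pos, ch in enumerate(text):
--         if ch in "<>!=" and depth == 0:
--             if not run:
--                 start = pos + 1
--             run += ch
--             continue
--         if run:
--             if run not in VALID:
--                 bad.append((run, start))
--             run = ""
--         if ch == "[":
--             depth += 1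
--         elif ch == "]":
--             depth = max(0, depth - 1)
--     if run and run not in VALID:
--         bad.append((run, start))
--     return bad
-- ===== Notes on version B (the rewrite author's own statement) =====
-- stated objective: simpler
-- what changed: A's index-jumping while-loop with a nested run-scanning inner while is replaced by a single left-to-right fold over enumerate(text) that carries (depth, current operator run, its start, results) in its state and flushes the run when a non-operator char or the end of the text is reached.
import Mathlib
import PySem

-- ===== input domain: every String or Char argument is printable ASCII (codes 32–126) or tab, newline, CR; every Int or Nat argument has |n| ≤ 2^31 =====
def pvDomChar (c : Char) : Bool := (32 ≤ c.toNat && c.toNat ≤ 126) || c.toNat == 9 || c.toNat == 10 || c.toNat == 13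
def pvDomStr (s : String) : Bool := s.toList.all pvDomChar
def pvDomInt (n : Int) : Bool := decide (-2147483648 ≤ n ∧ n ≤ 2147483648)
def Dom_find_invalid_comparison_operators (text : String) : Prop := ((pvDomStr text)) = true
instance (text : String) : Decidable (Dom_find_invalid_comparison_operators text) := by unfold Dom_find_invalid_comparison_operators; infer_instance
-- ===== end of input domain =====

-- B replaces A's index-jumping while-loop (with its inner run-scanning while) by a single
-- left-to-right fold that accumulates the current operator run in its state (objective: simpler).

-- ===== PORT A =====
-- ch ∈ "<>!=": membership in the list of those four characters (exact on chars)
def pvOps : List Char := ['<', '>', '!', '=']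
-- the tuple ("==", "!=", ">=", "<=", ">", "<")
def pvValid : List String := ["==", "!=", ">=", "<=", ">", "<"]

-- inner while: 'while j < len(text) and text[j] in "<>!=": j += 1'
def pvRunEnd (cs : List Char) (j : Nat) : Nat :=
  if h : j < cs.length then
    if cs[j] ∈ pvOps then pvRunEnd cs (j + 1) else j
  else j
termination_by cs.length - j

theorem pvRunEnd_ge (cs : List Char) (j : Nat) : j ≤ pvRunEnd cs j := by
  unfold pvRunEnd
  split
  · split
    · have := pvRunEnd_ge cs (j + 1); omega
    · exact le_refl _
  · exact le_refl _
termination_by cs.length - j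

theorem pvRunEnd_gt (cs : List Char) (j : Nat) (h : j < cs.length) (hop : cs[j] ∈ pvOps) :
    j < pvRunEnd cs j := by
  unfold pvRunEnd
  rw [dif_pos h, if_pos hop]
  have := pvRunEnd_ge cs (j + 1); omega

-- outer while loop of A, state (i, bracket_depth, bad)
def pvALoop (cs : List Char) (i : Nat) (depth : Nat) (bad : List (String × Int)) :
    List (String × Int) :=
  if h : i < cs.length then
    let ch := cs[i]
    if ch = '[' then pvALoop cs (i + 1) (depth + 1) bad
    else if ch = ']' then pvALoop cs (i + 1) (max 0 (depth - 1)) bad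
    else if hc : depth = 0 ∧ ch ∈ pvOps then
      let j := pvRunEnd cs i
      have hij : i < j := pvRunEnd_gt cs i h hc.2
      -- op_run = text[i:j] with 0 ≤ i ≤ j: exactly drop/take
      let op_run := String.ofList ((cs.drop i).take (j - i))
      let bad' := if op_run ∈ pvValid then bad else bad ++ [(op_run, (i : Int) + 1)]
      pvALoop cs j depth bad'
    else pvALoop cs (i + 1) depth bad
  else bad
termination_by cs.length - i
decreasing_by all_goals omega

def find_invalid_comparison_operators (text : String) : List (String × Int) :=
  -- 'text = text or ""' is the identity on strings here
  pvALoop text.toList 0 0 []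

-- ===== PORT B =====
-- fold state: (depth, run, start, bad)
def pvStep (st : Nat × String × Int × List (String × Int)) (p : Int × Char) :
    Nat × String × Int × List (String × Int) :=
  let (depth, run, start, bad) := st
  let (pos, ch) := p
  if ch ∈ pvOps ∧ depth = 0 then
    let start' := if run = "" then pos + 1 else start
    (depth, run.push ch, start', bad)
  else
    let bad' := if run ≠ "" ∧ run ∉ pvValid then bad ++ [(run, start)] else bad
    let depth' := if ch = '[' then depth + 1 else if ch = ']' then max 0 (depth - 1) else depth
    (depth', "", start, bad')

-- final 'if run and run not in VALID' flush
def pvFinish (st : Nat × String × Int × List (String × Int)) : List (String × Int) :=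
  let (_, run, start, bad) := st
  if run ≠ "" ∧ run ∉ pvValid then bad ++ [(run, start)] else bad

def find_invalid_comparison_operators_alt (text : String) : List (String × Int) :=
  pvFinish ((PySem.List.enumerate text.toList 0).foldl pvStep (0, "", 0, []))

-- ===== PRECONDITION & SPEC =====
def Spec_find_invalid_comparison_operators (text : String) (out : List (String × Int)) : Prop := out = find_invalid_comparison_operators_alt text
instance (text : String) (out : List (String × Int)) : Decidable (Spec_find_invalid_comparison_operators text out) := by unfold Spec_find_invalid_comparison_operators; infer_instance

-- ===== CLAIM (what is proved, stated in full; the proofs are below) =====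
def Claim_equal_find_invalid_comparison_operators : Prop := ∀ (text : String), Dom_find_invalid_comparison_operators text → Spec_find_invalid_comparison_operators text (find_invalid_comparison_operators text)

-- ===== LEMMAS AND PROOFS =====

theorem pvRunEnd_le (cs : List Char) (j : Nat) (h : j ≤ cs.length) : pvRunEnd cs j ≤ cs.length := by
  unfold pvRunEnd
  split
  · split
    · exact pvRunEnd_le cs (j + 1) (by omega)
    · exact h
  · exact h
termination_by cs.length - j

-- every char of the scanned run is an operator char
theorem pvRunEnd_ops (cs : List Char) (j : Nat) :
    ∀ c ∈ (cs.drop j).take (pvRunEnd cs j - j), c ∈ pvOps := by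
  unfold pvRunEnd
  split
  · rename_i h
    split
    · rename_i hop
      intro c hc
      have hge := pvRunEnd_ge cs (j + 1)
      rw [List.drop_eq_getElem_cons h] at hc
      have htake : pvRunEnd cs (j + 1) - j = (pvRunEnd cs (j + 1) - (j + 1)) + 1 := by omega
      rw [htake, List.take_succ_cons] at hc
      rcases List.mem_cons.mp hc with h1 | h2
      · exact h1 ▸ hop
      · exact pvRunEnd_ops cs (j + 1) c h2
    · simp
  · simp
termination_by cs.length - j

-- the char at the run's end (if any) is not an operator char
theorem pvRunEnd_stop (cs : List Char) (j k : Nat) (hk : pvRunEnd cs j = k)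
    (h : k < cs.length) : cs[k] ∉ pvOps := by
  by_cases h1 : j < cs.length
  · by_cases h2 : cs[j] ∈ pvOps
    · exact pvRunEnd_stop cs (j + 1) k (by rw [pvRunEnd, dif_pos h1, if_pos h2] at hk; exact hk) h
    · have hjk : k = j := by rw [pvRunEnd, dif_pos h1, if_neg h2] at hk; omega
      subst hjk; exact h2
  · have hjk : k = j := by rw [pvRunEnd, dif_neg h1] at hk; omega
    subst hjk; exact absurd h h1
termination_by cs.length - j

-- folding pvStep at depth 0 over a block of operator chars accumulates them into the run
theorem pvRunFold (u : List Char) (hu : ∀ c ∈ u, c ∈ pvOps) (k : Int) (run : String)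
    (s : Int) (bad : List (String × Int)) :
    (PySem.List.enumerate u k).foldl pvStep (0, run, s, bad)
      = (0, run ++ String.ofList u, (if run = "" ∧ u ≠ [] then k + 1 else s), bad) := by
  induction u generalizing k run s with
  | nil => simp [PySem.List.enumerate_nil]
  | cons c rest ih =>
    rw [PySem.List.enumerate_cons, List.foldl_cons]
    have hc : c ∈ pvOps := hu c (List.mem_cons_self ..)
    have hstep : pvStep (0, run, s, bad) (k, c)
        = (0, run.push c, (if run = "" then k + 1 else s), bad) := by
      simp [pvStep, hc]
    rw [hstep, ih (fun c hc => hu c (List.mem_cons_of_mem _ hc))]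
    have hpush : run.push c ≠ "" := by simp
    have hmk : run.push c ++ String.ofList rest = run ++ String.ofList (c :: rest) := by
      apply String.ext; simp
    rw [hmk]
    by_cases hr : run = "" <;> simp [hr, hpush]

-- main invariant: the fold over the enumerated suffix, finished, equals A's loop
theorem pvMain (cs : List Char) (i : Nat) (d : Nat) (s : Int) (bad : List (String × Int)) :
    pvFinish ((PySem.List.enumerate (cs.drop i) (i : Int)).foldl pvStep (d, "", s, bad))
      = pvALoop cs i d bad := by
  by_cases h : i < cs.length
  · by_cases h1 : cs[i] = '['
    · rw [List.drop_eq_getElem_cons h, PySem.List.enumerate_cons, List.foldl_cons]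
      have hstep : pvStep (d, "", s, bad) ((i : Int), cs[i]) = (d + 1, "", s, bad) := by
        simp [pvStep, h1, pvOps]
      rw [hstep]
      have := pvMain cs (i + 1) (d + 1) s bad
      rw [pvALoop]; simp only [h, dif_pos]; rw [if_pos h1]
      push_cast at this ⊢; exact this
    · by_cases h2 : cs[i] = ']'
      · rw [List.drop_eq_getElem_cons h, PySem.List.enumerate_cons, List.foldl_cons]
        have hstep : pvStep (d, "", s, bad) ((i : Int), cs[i]) = (max 0 (d - 1), "", s, bad) := by
          simp [pvStep, h2, pvOps]
        rw [hstep]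
        have := pvMain cs (i + 1) (max 0 (d - 1)) s bad
        rw [pvALoop]; simp only [h, dif_pos]; rw [if_neg h1, if_pos h2]
        push_cast at this ⊢; exact this
      · by_cases h3 : d = 0 ∧ cs[i] ∈ pvOps
        · -- operator-run case
          obtain ⟨hd, hop⟩ := h3
          subst hd
          set j := pvRunEnd cs i with hj
          have hij : i < j := pvRunEnd_gt cs i h hop
          have hjle : j ≤ cs.length := pvRunEnd_le cs i (by omega)
          set u : List Char := (cs.drop i).take (j - i) with hu
          have hulen : u.length = j - i := by
            rw [hu, List.length_take, List.length_drop]; omega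
          have hune : u ≠ [] := by
            intro hnil; rw [hnil] at hulen; simp at hulen; omega
          have huops : ∀ c ∈ u, c ∈ pvOps := pvRunEnd_ops cs i
          have hdecomp : cs.drop i = u ++ cs.drop j := by
            have hdd : (cs.drop i).drop (j - i) = cs.drop j := by
              rw [List.drop_drop]
              congr 1
              omega
            rw [hu, ← hdd, List.take_append_drop]
          set op_run := String.ofList u with hor
          have horne : op_run ≠ "" := by
            rcases u with _ | ⟨c, rest⟩
            · exact absurd rfl hune
            · simp [hor]
          set bad' := if op_run ∈ pvValid then bad else bad ++ [(op_run, (i : Int) + 1)] with hbad'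
          have hA : pvALoop cs i 0 bad = pvALoop cs j 0 bad' := by
            rw [pvALoop, dif_pos h, if_neg h1, if_neg h2,
              dif_pos (show (0 : Nat) = 0 ∧ cs[i] ∈ pvOps from ⟨rfl, hop⟩)]
          rw [hdecomp, PySem.List.enumerate_append, List.foldl_append]
          rw [pvRunFold u huops _ _ _ _]
          have hoff : (i : Int) + u.length = (j : Int) := by
            rw [hulen]; omega
          rw [hoff, if_pos (show ("" : String) = "" ∧ u ≠ [] from ⟨rfl, hune⟩)]
          rw [show ("" : String) ++ String.ofList u = op_run from by simp [hor]]
          -- now the fold continues from position j with run = op_run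
          by_cases hjl : j < cs.length
          · have hstop : cs[j] ∉ pvOps := pvRunEnd_stop cs i j hj.symm hjl
            rw [List.drop_eq_getElem_cons hjl, PySem.List.enumerate_cons, List.foldl_cons]
            have hflush : (if op_run ≠ "" ∧ op_run ∉ pvValid then bad ++ [(op_run, (i : Int) + 1)] else bad) = bad' := by
              by_cases hv : op_run ∈ pvValid <;> simp [hbad', hv, horne]
            by_cases hb1 : cs[j] = '['
            · have hstep : pvStep (0, op_run, (i : Int) + 1, bad) ((j : Int), cs[j])
                  = (1, "", (i : Int) + 1, bad') := by
                simp only [pvStep, hb1, pvOps]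
                rw [if_neg (by simp), hflush]
                simp
              rw [hstep]
              have := pvMain cs (j + 1) 1 ((i : Int) + 1) bad'
              rw [hA, pvALoop]; simp only [hjl, dif_pos]; rw [if_pos hb1]
              push_cast at this ⊢; exact this
            · by_cases hb2 : cs[j] = ']'
              · have hstep : pvStep (0, op_run, (i : Int) + 1, bad) ((j : Int), cs[j])
                    = (max 0 (0 - 1), "", (i : Int) + 1, bad') := by
                  simp only [pvStep, hb2, pvOps]
                  rw [if_neg (by simp), hflush]
                  simp
                rw [hstep]
                have := pvMain cs (j + 1) (max 0 (0 - 1)) ((i : Int) + 1) bad'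
                rw [hA, pvALoop]; simp only [hjl, dif_pos]; rw [if_neg hb1, if_pos hb2]
                push_cast at this ⊢; exact this
              · have hstep : pvStep (0, op_run, (i : Int) + 1, bad) ((j : Int), cs[j])
                    = (0, "", (i : Int) + 1, bad') := by
                  simp only [pvStep, hb1, hb2]
                  rw [if_neg (by simp [hstop]), hflush]
                  simp
                rw [hstep]
                have := pvMain cs (j + 1) 0 ((i : Int) + 1) bad'
                rw [hA, pvALoop]; simp only [hjl, dif_pos]
                rw [if_neg hb1, if_neg hb2, dif_neg (by simp [hstop])]
                push_cast at this ⊢; exact this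
          · have hje : j = cs.length := by omega
            rw [List.drop_eq_nil_of_le (by omega), PySem.List.enumerate_nil, List.foldl_nil]
            rw [hA, pvALoop, dif_neg hjl]
            by_cases hv : op_run ∈ pvValid <;> simp [pvFinish, hbad', hv, horne]
        · -- plain char at depth d (or operator char inside brackets)
          rw [List.drop_eq_getElem_cons h, PySem.List.enumerate_cons, List.foldl_cons]
          have hnot : ¬ (cs[i] ∈ pvOps ∧ d = 0) := fun ⟨a, b⟩ => h3 ⟨b, a⟩
          have hstep : pvStep (d, "", s, bad) ((i : Int), cs[i]) = (d, "", s, bad) := by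
            simp [pvStep, hnot, h1, h2]
          rw [hstep]
          have := pvMain cs (i + 1) d s bad
          rw [pvALoop]; simp only [h, dif_pos]
          rw [if_neg h1, if_neg h2, dif_neg h3]
          push_cast at this ⊢; exact this
  · rw [List.drop_eq_nil_of_le (by omega), PySem.List.enumerate_nil, List.foldl_nil]
    rw [pvALoop, dif_neg h]
    simp [pvFinish]
termination_by cs.length - i
decreasing_by all_goals omega

-- ===== VERDICT (by name: the statement is the Claim_ definition above) =====
theorem find_invalid_comparison_operators_spec : Claim_equal_find_invalid_comparison_operators := by
  intro text _
  unfold Spec_find_invalid_comparison_operators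
  unfold find_invalid_comparison_operators find_invalid_comparison_operators_alt
  have := pvMain text.toList 0 0 0 []
  simpa using this.symm
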